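-- pv_equiv track=rewrite | github.com/qixils/HTSea | app/api/wordle.py | guessword
-- ===== SOURCE A (Python) =====
-- import collections
--
-- def guessword(wword, wguess):
--     pool = collections.Counter(s for s, g in zip(wword, wguess) if s != g)
--     wscore = []
--     for secret_char, guess_char in zip(wword, wguess):
--         if secret_char == guess_char:
--             wscore.append("g")
--         elif guess_char in wword and pool[guess_char] > 0:
--             wscore.append("y")
--             pool[guess_char] -= 1
--         else:
--             wscore.append("x")
--     return "".join(wscore)
-- ===== SOURCE B (Python) =====
-- def guessword(wword, wguess):
--     pairs = list(zip(wword, wguess))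
--     quota = {}   # count of each letter among non-green secret letters
--     ranks = []   # per position: None if green, else rank of this non-green guess occurrence
--     occ = {}
--     for s, g in pairs:
--         if s == g:
--             ranks.append(None)
--         else:
--             quota[s] = quota.get(s, 0) + 1
--             ranks.append(occ.get(g, 0))
--             occ[g] = occ.get(g, 0) + 1
--     return ''.join('g' if r is None else ('y' if r < quota.get(g, 0) else 'x')
--                    for (s, g), r in zip(pairs, ranks))
-- ===== Notes on version B (the rewrite author's own statement) =====
-- stated objective: alternative
-- what changed: Replaces A's single scoring loop that consumes a mutable decrementing Counter (plus a 'guess_char in wword' membership scan) by a staged rank/quota scheme: one analysis pass records each non-green position's occurrence rank of its guess letter and the letters' non-green secret quotas, then a pure stateless map decides g/y/x by comparing rank < quota.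
import Mathlib
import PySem

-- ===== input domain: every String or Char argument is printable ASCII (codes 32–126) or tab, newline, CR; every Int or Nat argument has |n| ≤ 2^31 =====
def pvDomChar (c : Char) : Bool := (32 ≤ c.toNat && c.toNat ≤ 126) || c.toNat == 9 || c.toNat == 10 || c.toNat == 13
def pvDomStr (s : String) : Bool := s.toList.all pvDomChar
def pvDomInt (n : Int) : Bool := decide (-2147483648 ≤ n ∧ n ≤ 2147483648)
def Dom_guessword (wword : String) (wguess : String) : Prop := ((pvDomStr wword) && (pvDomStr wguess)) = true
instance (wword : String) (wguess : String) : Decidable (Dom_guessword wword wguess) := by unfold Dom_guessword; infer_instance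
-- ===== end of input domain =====

-- Alternative decomposition: A scores in one loop that consumes a mutable decrementing Counter and
-- tests membership in the secret word; B first computes per-position occurrence ranks and per-letter
-- quotas in an analysis pass, then a pure stateless map compares rank < quota. Proved equal everywhere.


-- ===== PORT A =====
-- A's single loop: state (pool, wscore); 'guess_char in wword' on a single character is char
-- membership in the word (exact for 1-char needles).
def guessA_loop (W : List Char) : List (Char × Char) → PySem.Dict Char Int × List String → PySem.Dict Char Int × List String
  | [], st => st
  | p :: r, st =>
    if p.1 = p.2 then guessA_loop W r (st.1, st.2 ++ ["g"])
    else if W.contains p.2 ∧ 0 < PySem.Dict.getD st.1 p.2 0 then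
      guessA_loop W r (PySem.Dict.modify st.1 p.2 0 (· - 1), st.2 ++ ["y"])
    else guessA_loop W r (st.1, st.2 ++ ["x"])

-- pool = Counter(s for s, g in zip(wword, wguess) if s != g)
def guessword (wword : String) (wguess : String) : String :=
  let pairs := wword.toList.zip wguess.toList
  let pool : PySem.Dict Char Int :=
    PySem.Dict.counter ((pairs.filter (fun p => !(p.1 == p.2))).map (·.1))
  PySem.Str.join "" (guessA_loop wword.toList pairs (pool, [])).2

-- ===== PORT B =====
-- B's analysis pass: state (quota, ranks, occ); greens get rank None, non-greens record the
-- occurrence rank occ[g] of their guess letter and bump quota[s] and occ[g].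
def altPass1 : List (Char × Char) → PySem.Dict Char Int × List (Option Int) × PySem.Dict Char Int → PySem.Dict Char Int × List (Option Int) × PySem.Dict Char Int
  | [], st => st
  | p :: r, st =>
    if p.1 = p.2 then altPass1 r (st.1, st.2.1 ++ [none], st.2.2)
    else altPass1 r (PySem.Dict.insert st.1 p.1 (PySem.Dict.getD st.1 p.1 0 + 1),
                     st.2.1 ++ [some (PySem.Dict.getD st.2.2 p.2 0)],
                     PySem.Dict.modify st.2.2 p.2 0 (· + 1))

-- ''.join('g' if r is None else ('y' if r < quota.get(g, 0) else 'x') for (s, g), r in zip(pairs, ranks))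
def guessword_alt (wword : String) (wguess : String) : String :=
  let pairs := wword.toList.zip wguess.toList
  let st := altPass1 pairs (PySem.Dict.empty, [], PySem.Dict.empty)
  PySem.Str.join "" ((pairs.zip st.2.1).map (fun q =>
    match q.2 with
    | none => "g"
    | some k => if k < PySem.Dict.getD st.1 q.1.2 0 then "y" else "x"))

-- ===== PRECONDITION & SPEC =====
def Spec_guessword (wword : String) (wguess : String) (out : String) : Prop := out = guessword_alt wword wguess
instance (wword : String) (wguess : String) (out : String) : Decidable (Spec_guessword wword wguess out) := by unfold Spec_guessword; infer_instance

-- ===== CLAIM (what is proved, stated in full; the proofs are below) =====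
def Claim_equal_guessword : Prop := ∀ (wword : String) (wguess : String), Dom_guessword wword wguess → Spec_guessword wword wguess (guessword wword wguess)

-- ===== LEMMAS AND PROOFS =====

-- reference scorer: the rank-based rule read left to right over the prefix 'seen'
def pvGo (ng : List Char) : List (Char × Char) → List (Char × Char) → List String
  | _, [] => []
  | seen, p :: r =>
    (if p.1 = p.2 then "g"
     else if (seen.filter (fun q => !(q.1 == q.2) && q.2 == p.2)).length < ng.count p.2 then "y"
     else "x") :: pvGo ng (seen ++ [p]) r

-- rank of char c after prefix 'seen'
def pvRank (seen : List (Char × Char)) (c : Char) : Nat :=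
  (seen.filter (fun q => !(q.1 == q.2) && q.2 == c)).length

-- the rank annotations B's pass 1 appends, relative to the prefix 'seen'
def pvRanks : List (Char × Char) → List (Char × Char) → List (Option Int)
  | _, [] => []
  | seen, p :: r =>
    (if p.1 = p.2 then none else some (pvRank seen p.2 : Int)) :: pvRanks (seen ++ [p]) r

lemma pvRank_append (seen : List (Char × Char)) (p : Char × Char) (c : Char) :
    pvRank (seen ++ [p]) c =
      pvRank seen c + (if (!(p.1 == p.2) && p.2 == c) = true then 1 else 0) := by
  simp only [pvRank, List.filter_append, List.length_append]
  congr 1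
  by_cases h : (!(p.1 == p.2) && p.2 == c) = true <;> simp [List.filter, h]

-- A's loop computes the rank-based rule, under the invariant
-- pool[c] = ng.count c - min (rank seen c) (ng.count c), with ng ⊆ W.
lemma loop_eq (W : List Char) (ng : List Char)
    (hng : ∀ c ∈ ng, W.contains c = true) :
    ∀ (pairs seen : List (Char × Char)) (pool : PySem.Dict Char Int) (acc : List String),
    (∀ c : Char, PySem.Dict.getD pool c 0 =
        (ng.count c : Int) - (min (pvRank seen c) (ng.count c) : Nat)) →
    (guessA_loop W pairs (pool, acc)).2 = acc ++ pvGo ng seen pairs := by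
  intro pairs
  induction pairs with
  | nil => intro seen pool acc _; simp [guessA_loop, pvGo]
  | cons p r ih =>
    intro seen pool acc H
    rw [guessA_loop, pvGo]
    by_cases hg : p.1 = p.2
    · rw [if_pos hg, if_pos hg, ih (seen ++ [p]) pool (acc ++ ["g"]) ?_]
      · simp
      · intro c
        rw [pvRank_append]
        have : (!(p.1 == p.2) && p.2 == c) = false := by simp [hg]
        rw [this]
        simpa using H c
    · rw [if_neg hg, if_neg hg]
      by_cases hy : pvRank seen p.2 < ng.count p.2
      · -- yellow: pool[p.2] > 0 and p.2 ∈ ng ⊆ W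
        have hpos : 0 < PySem.Dict.getD pool p.2 0 := by have := H p.2; omega
        have hc : W.contains p.2 = true :=
          hng p.2 (List.count_pos_iff.mp (Nat.lt_of_le_of_lt (Nat.zero_le _) hy))
        rw [if_pos ⟨hc, hpos⟩,
            if_pos (show (List.filter (fun q => !q.1 == q.2 && q.2 == p.2) seen).length < ng.count p.2 from hy),
            ih (seen ++ [p]) (PySem.Dict.modify pool p.2 0 (· - 1)) (acc ++ ["y"]) ?_]
        · simp
        · intro c
          rw [PySem.Dict.getD_modify, pvRank_append]
          by_cases hc2 : c = p.2
          · subst hc2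
            have hb : (!(p.1 == p.2) && p.2 == p.2) = true := by simp [hg]
            rw [if_pos rfl, hb, if_pos rfl]
            have := H p.2; omega
          · have hb : (!(p.1 == p.2) && p.2 == c) = false := by
              simp [Ne.symm hc2]
            rw [if_neg hc2, hb]
            simpa using H c
      · -- gray: pool[p.2] = 0
        have hz : PySem.Dict.getD pool p.2 0 = 0 := by have := H p.2; omega
        rw [if_neg (by rw [hz]; exact fun h => lt_irrefl 0 h.2),
            if_neg (show ¬ (List.filter (fun q => !q.1 == q.2 && q.2 == p.2) seen).length < ng.count p.2 from hy),
            ih (seen ++ [p]) pool (acc ++ ["x"]) ?_]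
        · simp
        · intro c
          rw [pvRank_append]
          by_cases hc2 : c = p.2
          · subst hc2
            have hb : (!(p.1 == p.2) && p.2 == p.2) = true := by simp [hg]
            rw [hb, if_pos rfl]
            have := H p.2; omega
          · have hb : (!(p.1 == p.2) && p.2 == c) = false := by
              simp [Ne.symm hc2]
            rw [hb]
            simpa using H c

-- B's pass 1, quota projection: the insert-fold over the non-green secret letters
lemma pass1_fst : ∀ (pairs : List (Char × Char)) (quota : PySem.Dict Char Int)
    (ranks : List (Option Int)) (occ : PySem.Dict Char Int),
    (altPass1 pairs (quota, ranks, occ)).1 =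
      ((pairs.filter (fun p => !(p.1 == p.2))).map (·.1)).foldl
        (fun d x => PySem.Dict.insert d x (PySem.Dict.getD d x 0 + 1)) quota := by
  intro pairs
  induction pairs with
  | nil => intro quota ranks occ; simp [altPass1]
  | cons p r ih =>
    intro quota ranks occ
    rw [altPass1]
    by_cases hg : p.1 = p.2
    · rw [if_pos hg, ih]
      simp [hg]
    · rw [if_neg hg, ih]
      simp [hg]

-- B's pass 1, ranks projection: appends pvRanks, under the invariant occ[c] = rank seen c
lemma pass1_ranks : ∀ (pairs seen : List (Char × Char)) (quota : PySem.Dict Char Int)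
    (ranks : List (Option Int)) (occ : PySem.Dict Char Int),
    (∀ c : Char, PySem.Dict.getD occ c 0 = (pvRank seen c : Int)) →
    (altPass1 pairs (quota, ranks, occ)).2.1 = ranks ++ pvRanks seen pairs := by
  intro pairs
  induction pairs with
  | nil => intro seen quota ranks occ _; simp [altPass1, pvRanks]
  | cons p r ih =>
    intro seen quota ranks occ H
    rw [altPass1, pvRanks]
    by_cases hg : p.1 = p.2
    · rw [if_pos hg, if_pos hg, ih (seen ++ [p]) _ (ranks ++ [none]) occ ?_]
      · simp
      · intro c
        rw [pvRank_append]
        have : (!(p.1 == p.2) && p.2 == c) = false := by simp [hg]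
        rw [this]
        simpa using H c
    · rw [if_neg hg, if_neg hg, H p.2,
          ih (seen ++ [p]) _ (ranks ++ [some (pvRank seen p.2 : Int)])
            (PySem.Dict.modify occ p.2 0 (· + 1)) ?_]
      · simp
      · intro c
        rw [PySem.Dict.getD_modify, pvRank_append]
        by_cases hc2 : c = p.2
        · subst hc2
          have hb : (!(p.1 == p.2) && p.2 == p.2) = true := by simp [hg]
          rw [if_pos rfl, hb, if_pos rfl, H p.2]
          push_cast
          ring
        · have hb : (!(p.1 == p.2) && p.2 == c) = false := by simp [Ne.symm hc2]
          rw [if_neg hc2, hb]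
          simpa using H c

-- B's decision map over zip(pairs, ranks) is the rank-based rule
lemma mapzip_eq (ng : List Char) (quota : PySem.Dict Char Int)
    (hq : ∀ c : Char, PySem.Dict.getD quota c 0 = (ng.count c : Int)) :
    ∀ (pairs seen : List (Char × Char)),
    ((pairs.zip (pvRanks seen pairs)).map (fun q =>
      match q.2 with
      | none => "g"
      | some k => if k < PySem.Dict.getD quota q.1.2 0 then "y" else "x")) = pvGo ng seen pairs := by
  intro pairs
  induction pairs with
  | nil => intro seen; simp [pvRanks, pvGo]
  | cons p r ih =>
    intro seen
    rw [pvRanks, pvGo]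
    by_cases hg : p.1 = p.2
    · rw [if_pos hg, if_pos hg, List.zip_cons_cons, List.map_cons, ih (seen ++ [p])]
    · rw [if_neg hg, if_neg hg, List.zip_cons_cons, List.map_cons, ih (seen ++ [p])]
      congr 1
      rw [hq p.2]
      by_cases hy : pvRank seen p.2 < ng.count p.2
      · rw [if_pos (show (List.filter (fun q => !q.1 == q.2 && q.2 == p.2) seen).length < ng.count p.2 from hy)]
        exact if_pos (by exact_mod_cast hy)
      · rw [if_neg (show ¬ (List.filter (fun q => !q.1 == q.2 && q.2 == p.2) seen).length < ng.count p.2 from hy)]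
        exact if_neg (by exact_mod_cast hy)

-- ===== VERDICT (by name: the statement is the Claim_ definition above) =====
theorem guessword_spec : Claim_equal_guessword := by
  intro wword wguess _
  unfold Spec_guessword guessword guessword_alt
  dsimp only
  set pairs := wword.toList.zip wguess.toList with hpairs
  set ng := (pairs.filter (fun p => !(p.1 == p.2))).map (·.1) with hng
  have hsub : ∀ c ∈ ng, wword.toList.contains c = true := by
    intro c hc
    obtain ⟨p, hpmem, hpc⟩ := List.mem_map.mp hc
    have := (List.of_mem_zip (hpairs ▸ (List.mem_filter.mp hpmem).1)).1
    simpa [List.contains_iff_mem, hpc] using this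
  -- A's side
  rw [loop_eq wword.toList ng hsub pairs [] (PySem.Dict.counter ng) [] ?_, List.nil_append]
  · -- B's side
    have hfst := pass1_fst pairs PySem.Dict.empty [] PySem.Dict.empty
    have hranks := pass1_ranks pairs [] PySem.Dict.empty [] PySem.Dict.empty
      (by intro c; simp [pvRank, PySem.Dict.getD, PySem.Dict.empty, PySem.Dict.get?])
    rw [hfst, hranks, List.nil_append,
        PySem.Dict.foldl_insert_getD_add_one_eq_counter,
        mapzip_eq ng (PySem.Dict.counter ng)
          (by intro c; rw [PySem.Dict.getD_counter]) pairs []]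
  · intro c
    rw [PySem.Dict.getD_counter]
    simp [pvRank]
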